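/- GENERATED by farm/worked/mk_tree_copies.py from farm/worked/point_compare/Proof.lean (a worked proof of the farm's unit `point_compare`,
   accepted by the verdict) — do not edit. -/
import Vorbis.Spec.Units.point_compare

open X86 X86.User Asan Vorbis

set_option maxRecDepth 4000
set_option maxHeartbeats 4000000

theorem Vorbis.Spec.Worked.point_compare_ok : Vorbis.Spec.point_compare.Statement := by
  intro Lay hLay μ hμ u₀ hcode hload2 others frames u ret he hpre
  v_entry he
  obtain ⟨hsh, hlp, hlq⟩ := hpre
  have hsp := hsh.rsp
  have hwp := hlp.where_ hsh.inv hsh.offText (by decide)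
  have hwq := hlq.where_ hsh.inv hsh.offText (by decide)
  u_walk hcode [hμ.vendor] span [Vorbis.L.textLo, Vorbis.L.textHi] side (v_side)
  · have hun : ShadowUntouched u.mem s_104bac.mem := by v_untouched
    exact hlp.accSmall hsh.inv hun _ 2 (by decide) (by u_omega) (by u_omega)
  · have hun : ShadowUntouched u.mem s_104bb8.mem := by v_untouched
    exact hlq.accSmall hsh.inv hun _ 2 (by decide) (by u_omega) (by u_omega)
  · refine ReachVia.done ?_
    v_returned
    refine ⟨by v_untouched, ?_⟩
    rw [w_rax]
    have hx : u.mem.readLE (u.reg .rdi) 2 < 2 ^ 16 := Mem.readLE_lt _ _ _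
    have hy : u.mem.readLE (u.reg .rsi) 2 < 2 ^ 16 := Mem.readLE_lt _ _ _
    simp only [BitVec.toNat_setWidth, BitVec.zeroExtend, BitVec.toNat_ofNat, Nat.reducePow] at hbr_104bc3 ⊢
    unfold Vorbis.Spec.cmpResult
    rw [if_pos (by omega)]
    rfl
  · refine ReachVia.done ?_
    v_returned
    refine ⟨by v_untouched, ?_⟩
    rw [w_rax]
    simp only [cond_simp, X86.Cond.lt_eq_decide_toNat, decide_eq_true_eq, BitVec.toNat_ofNat, Nat.reducePow]
    have hx : u.mem.readLE (u.reg .rdi) 2 < 2 ^ 16 := Mem.readLE_lt _ _ _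
    have hy : u.mem.readLE (u.reg .rsi) 2 < 2 ^ 16 := Mem.readLE_lt _ _ _
    simp only [BitVec.toNat_setWidth, BitVec.zeroExtend, BitVec.toNat_ofNat, Nat.reducePow] at hbr_104bc3 ⊢
    unfold Vorbis.Spec.cmpResult
    have hnlt : ¬ u.mem.readLE (u.reg .rdi) 2 < u.mem.readLE (u.reg .rsi) 2 := by omega
    by_cases h : u.mem.readLE (u.reg .rsi) 2 < u.mem.readLE (u.reg .rdi) 2
    · rw [if_neg hnlt, if_pos h]
      split
      · rfl
      · omega
    · rw [if_neg hnlt, if_neg h]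
      split
      · omega
      · rfl
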